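-- pv_equiv track=rewrite | github.com/nerdywhiskers/ComfyUI-Whisker-Nodes | strip_masks.py | _split_sizes
-- ===== SOURCE A (Python) =====
-- def _split_sizes(total, num, primary_idx, primary_size):
--     """
--     Return a list of `num` sizes summing exactly to `total`. The strip at
--     primary_idx (0-indexed) takes primary_size pixels (clamped to [0, total]);
--     the remainder splits evenly across the others, with the rounding remainder
--     distributed 1px at a time across non-primary strips.
--     """
--     primary_idx = max(0, min(num - 1, primary_idx))
--     primary_size = max(0, min(total, primary_size))
--
--     if num == 1:
--         return [total]
--
--     remaining = total - primary_size
--     other_count = num - 1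
--     base = max(0, remaining // other_count)
--     rem = remaining - base * other_count
--
--     sizes = [base] * num
--     sizes[primary_idx] = primary_size
--
--     j = 0
--     for i in range(num):
--         if i == primary_idx:
--             continue
--         if j < rem:
--             sizes[i] += 1
--         j += 1
--     return sizes
-- ===== SOURCE B (Python) =====
-- def _split_sizes(total, num, primary_idx, primary_size):
--     primary_idx = max(0, min(num - 1, primary_idx))
--     primary_size = max(0, min(total, primary_size))
--     if num == 1:
--         return [total]
--     remaining = total - primary_size
--     m = num - 1
--     # Non-primary strip of rank k (its position among the num-1 non-primary
--     # strips) gets ceil((remaining - k) / m), clamped to >= 0: a per-position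
--     # closed form; the 1px remainder distribution emerges from the ceiling.
--     return [primary_size if i == primary_idx
--             else max(0, -((i - (1 if i > primary_idx else 0) - remaining) // m))
--             for i in range(num)]
-- ===== Notes on version B (the rewrite author's own statement) =====
-- stated objective: alternative
-- what changed: A computes a shared base = remaining // (num-1) and a remainder, then fills a full-length list and walks it with a skip-the-primary counter handing out the remainder 1px at a time; B has no base/remainder/counter at all: each non-primary strip of rank k is given independently by the closed form max(0, ceil((remaining - k)/(num-1))), so the remainder distribution emerges from ceiling division.
import Mathlib
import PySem

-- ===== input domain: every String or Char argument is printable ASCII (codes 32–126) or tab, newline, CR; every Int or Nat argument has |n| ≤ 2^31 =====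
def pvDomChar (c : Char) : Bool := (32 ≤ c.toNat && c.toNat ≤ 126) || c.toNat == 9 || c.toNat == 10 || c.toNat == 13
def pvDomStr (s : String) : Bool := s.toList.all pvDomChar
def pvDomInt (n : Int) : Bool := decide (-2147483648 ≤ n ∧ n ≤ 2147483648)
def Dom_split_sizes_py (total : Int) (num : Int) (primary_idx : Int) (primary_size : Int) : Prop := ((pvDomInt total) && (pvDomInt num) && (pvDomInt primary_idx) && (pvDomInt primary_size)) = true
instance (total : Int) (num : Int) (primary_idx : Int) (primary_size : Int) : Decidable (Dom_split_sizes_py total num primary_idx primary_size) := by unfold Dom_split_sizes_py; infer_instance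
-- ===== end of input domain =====

-- B drops A's shared base/remainder and skip-counter loop: each non-primary strip of
-- rank k is the independent closed form max(0, ceil((remaining-k)/(num-1))) (objective: alternative).

-- ===== PORT A =====
-- one iteration of A's 'for i in range(num)' loop; state is (sizes, j)
def pvStepA (pidx rem : Int) (st : List Int × Int) (i : Int) : List Int × Int :=
  if i == pidx then st
  else
    let st1 := if st.2 < rem then
        (PySem.List.pySetD st.1 i (PySem.List.pyGetD st.1 i 0 + 1), st.2)
      else st
    (st1.1, st1.2 + 1)

def split_sizes_py (total : Int) (num : Int) (primary_idx : Int) (primary_size : Int) : List Int :=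
  let pidx := max 0 (min (num - 1) primary_idx)
  let psize := max 0 (min total primary_size)
  if num == 1 then [total]
  else
    let remaining := total - psize
    let other_count := num - 1
    let base := max 0 (PySem.Int.floordiv remaining other_count)
    let rem := remaining - base * other_count
    let sizes0 := List.replicate num.toNat base
    let sizes1 := PySem.List.pySetD sizes0 pidx psize
    ((PySem.List.pyRange 0 num 1).foldl (pvStepA pidx rem) (sizes1, 0)).1

-- ===== PORT B =====
def split_sizes_py_alt (total : Int) (num : Int) (primary_idx : Int) (primary_size : Int) : List Int :=
  let pidx := max 0 (min (num - 1) primary_idx)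
  let psize := max 0 (min total primary_size)
  if num == 1 then [total]
  else
    let remaining := total - psize
    let m := num - 1
    (PySem.List.pyRange 0 num 1).map
      (fun i => if i == pidx then psize
        else max 0 (-(PySem.Int.floordiv (i - (if pidx < i then 1 else 0) - remaining) m)))

-- ===== PRECONDITION & SPEC =====
-- A raises IndexError when num <= 0 (sizes is empty and sizes[primary_idx] is assigned)
def Pre_split_sizes_py (total : Int) (num : Int) (primary_idx : Int) (primary_size : Int) : Prop := 1 ≤ num
instance (total : Int) (num : Int) (primary_idx : Int) (primary_size : Int) : Decidable (Pre_split_sizes_py total num primary_idx primary_size) := by unfold Pre_split_sizes_py; infer_instance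
def pvWitness_split_sizes_py : Int × Int × Int × Int := (10, 3, 1, 4)

def Spec_split_sizes_py (total : Int) (num : Int) (primary_idx : Int) (primary_size : Int) (out : List Int) : Prop := out = split_sizes_py_alt total num primary_idx primary_size
instance (total : Int) (num : Int) (primary_idx : Int) (primary_size : Int) (out : List Int) : Decidable (Spec_split_sizes_py total num primary_idx primary_size out) := by unfold Spec_split_sizes_py; infer_instance

-- ===== CLAIM (what is proved, stated in full; the proofs are below) =====
def Claim_equal_split_sizes_py : Prop := ∀ (total : Int) (num : Int) (primary_idx : Int) (primary_size : Int), Dom_split_sizes_py total num primary_idx primary_size → Pre_split_sizes_py total num primary_idx primary_size → Spec_split_sizes_py total num primary_idx primary_size (split_sizes_py total num primary_idx primary_size)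

-- ===== LEMMAS AND PROOFS =====

lemma pvFoldA_char (pidx rem n : Int) (hp0 : 0 ≤ pidx) :
    ∀ (m : Nat) (a : Int) (s : List Int), 0 ≤ a → a ≤ n → (n - a).toNat = m →
    (s.length : Int) = n →
    (((PySem.List.pyRange a n 1).foldl (pvStepA pidx rem)
        (s, if a ≤ pidx then a else a - 1)).1.length = s.length ∧
     ∀ k : Nat, (k : Int) < n →
      ((PySem.List.pyRange a n 1).foldl (pvStepA pidx rem)
        (s, if a ≤ pidx then a else a - 1)).1.getD k 0 =
        if (k : Int) < a ∨ (k : Int) = pidx then s.getD k 0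
        else s.getD k 0 + (if (if (k : Int) ≤ pidx then (k : Int) else (k : Int) - 1) < rem then 1 else 0)) := by
  intro m
  induction m with
  | zero =>
    intro a s ha0 han hm hs
    rw [PySem.List.pyRange_one_eq_nil (by omega)]
    refine ⟨rfl, ?_⟩
    intro k hk
    simp only [List.foldl_nil]
    rw [if_pos (Or.inl (by omega))]
  | succ m ih =>
    intro a s ha0 han hm hs
    have hlt : a < n := by omega
    rw [PySem.List.pyRange_one_cons hlt, List.foldl_cons]
    by_cases hap : a = pidx
    · have hstep : pvStepA pidx rem (s, if a ≤ pidx then a else a - 1) a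
        = (s, if a + 1 ≤ pidx then a + 1 else a + 1 - 1) := by
        simp [pvStepA, hap]
      rw [hstep]
      obtain ⟨hl, hpt⟩ := ih (a+1) s (by omega) (by omega) (by omega) hs
      refine ⟨hl, ?_⟩
      intro k hk
      rw [hpt k hk]
      by_cases hc : (k : Int) < a ∨ (k : Int) = pidx
      · rw [if_pos hc, if_pos (by omega)]
      · rw [if_neg hc, if_neg (by omega)]
    · -- a ≠ pidx
      have hj : (if a ≤ pidx then a else a - 1) + 1 = (if a + 1 ≤ pidx then a + 1 else a + 1 - 1) := by
        omega
      have hat : ((a.toNat : Int)) = a := Int.toNat_of_nonneg ha0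
      have halen : a.toNat < s.length := by omega
      have hv : PySem.List.pyGetD s a 0 = s.getD a.toNat 0 := by
        conv_lhs => rw [← hat]
        rw [PySem.List.pyGetD_natCast]
      by_cases hjr : (if a ≤ pidx then a else a - 1) < rem
      · have hstep : pvStepA pidx rem (s, if a ≤ pidx then a else a - 1) a
          = (s.set a.toNat (s.getD a.toNat 0 + 1), if a + 1 ≤ pidx then a + 1 else a + 1 - 1) := by
          simp only [pvStepA, beq_iff_eq, if_neg hap, if_pos hjr,
            PySem.List.pySetD_of_nonneg s _ ha0, hv]
          rw [hj]
        rw [hstep]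
        obtain ⟨hl, hpt⟩ := ih (a+1) (s.set a.toNat (s.getD a.toNat 0 + 1)) (by omega) (by omega) (by omega)
          (by rw [List.length_set]; exact hs)
        rw [List.length_set] at hl
        refine ⟨hl, ?_⟩
        intro k hk
        rw [hpt k hk]
        have hget : ∀ (j : Nat), (s.set a.toNat (s.getD a.toNat 0 + 1)).getD j 0
            = if j = a.toNat then s.getD a.toNat 0 + 1 else s.getD j 0 := by
          intro j
          by_cases hja : j = a.toNat
          · rw [if_pos hja, hja, List.getD_eq_getElem _ _ (by simpa using halen),
              List.getElem_set_self, List.getD_eq_getElem _ _ halen]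
          · rw [if_neg hja]
            unfold List.getD
            rw [List.getElem?_set_ne (by omega)]
        simp only [hget]
        by_cases hka : (k : Int) = a
        · have hk' : k = a.toNat := by omega
          have h1 : (if (k : Int) ≤ pidx then (k : Int) else (k : Int) - 1) < rem := by
            rw [hka]; exact hjr
          rw [if_pos (Or.inl (show (k : Int) < a + 1 by omega)), if_pos hk',
            if_neg (show ¬((k : Int) < a ∨ (k : Int) = pidx) by omega), if_pos h1, hk']
        · have hkna : ¬ k = a.toNat := by omega
          rw [if_neg hkna]
          by_cases hc : (k : Int) < a ∨ (k : Int) = pidx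
          · rw [if_pos (show (k : Int) < a + 1 ∨ (k : Int) = pidx by omega), if_pos hc]
          · rw [if_neg (show ¬((k : Int) < a + 1 ∨ (k : Int) = pidx) by omega), if_neg hc]
      · have hstep : pvStepA pidx rem (s, if a ≤ pidx then a else a - 1) a
          = (s, if a + 1 ≤ pidx then a + 1 else a + 1 - 1) := by
          simp only [pvStepA, beq_iff_eq, if_neg hap, if_neg hjr]
          rw [hj]
        rw [hstep]
        obtain ⟨hl, hpt⟩ := ih (a+1) s (by omega) (by omega) (by omega) hs
        refine ⟨hl, ?_⟩
        intro k hk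
        rw [hpt k hk]
        by_cases hka : (k : Int) = a
        · have h1 : ¬ (if (k : Int) ≤ pidx then (k : Int) else (k : Int) - 1) < rem := by
            rw [hka]; exact hjr
          rw [if_pos (Or.inl (show (k : Int) < a + 1 by omega)),
            if_neg (show ¬((k : Int) < a ∨ (k : Int) = pidx) by omega), if_neg h1]
          omega
        · by_cases hc : (k : Int) < a ∨ (k : Int) = pidx
          · rw [if_pos (show (k : Int) < a + 1 ∨ (k : Int) = pidx by omega), if_pos hc]
          · rw [if_neg (show ¬((k : Int) < a + 1 ∨ (k : Int) = pidx) by omega), if_neg hc]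

-- B's clamped ceiling at rank k equals A's base + one remainder pixel for the first rem ranks
lemma pvCeilEq (R m k : Int) (hm : 1 ≤ m) (hk0 : 0 ≤ k) (hkm : k < m) :
    max 0 (-(PySem.Int.floordiv (k - R) m))
      = max 0 (PySem.Int.floordiv R m)
        + (if k < R - max 0 (PySem.Int.floordiv R m) * m then 1 else 0) := by
  have hmpos : (0 : Int) < m := by omega
  set q := PySem.Int.floordiv R m with hqdef
  have hq : q * m ≤ R ∧ R < (q + 1) * m :=
    (PySem.Int.floordiv_eq_iff_of_pos hmpos).mp rfl
  have hc0 : (-(PySem.Int.floordiv (k - R) m) - 1) * m < R - k ∧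
      R - k ≤ -(PySem.Int.floordiv (k - R) m) * m := by
    have h := (PySem.Int.neg_floordiv_neg_eq_iff_of_pos (a := R - k) (b := m)
      (q := -(PySem.Int.floordiv (-(R - k)) m)) hmpos).mp rfl
    rwa [neg_sub] at h
  set c := -(PySem.Int.floordiv (k - R) m) with hcdef
  have hc : (c - 1) * m < R - k ∧ R - k ≤ c * m := hc0
  by_cases hR : 0 ≤ R
  · have hq0 : 0 ≤ q := by
      by_contra h
      have : q + 1 ≤ 0 := by omega
      nlinarith [hq.2]
    rw [max_eq_right hq0]
    by_cases hkr : k < R - q * m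
    · rw [if_pos hkr]
      have h1 : q * m < R - k := by omega
      have h2 : R - k ≤ (q + 1) * m := by nlinarith [hq.1]
      have hcq : c = q + 1 := by
        have hlt1 : (c - 1) * m < (q + 1) * m := lt_of_lt_of_le hc.1 h2
        have hlt2 : q * m < c * m := lt_of_lt_of_le h1 hc.2
        have e1 : c - 1 < q + 1 := lt_of_mul_lt_mul_right hlt1 (le_of_lt hmpos)
        have e2 : q < c := lt_of_mul_lt_mul_right hlt2 (le_of_lt hmpos)
        omega
      rw [hcq, max_eq_right (by omega)]
    · rw [if_neg hkr]
      have h1 : (q - 1) * m < R - k := by nlinarith [hq.1]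
      have h2 : R - k ≤ q * m := by omega
      have hcq : c = q := by
        have hlt1 : (c - 1) * m < q * m := lt_of_lt_of_le hc.1 h2
        have hlt2 : (q - 1) * m < c * m := lt_of_lt_of_le h1 hc.2
        have e1 : c - 1 < q := lt_of_mul_lt_mul_right hlt1 (le_of_lt hmpos)
        have e2 : q - 1 < c := lt_of_mul_lt_mul_right hlt2 (le_of_lt hmpos)
        omega
      rw [hcq, max_eq_right hq0, add_zero]
  · -- R < 0 : both sides are 0
    have hqneg : q < 0 := by
      by_contra h
      push_neg at h
      nlinarith [hq.1]
    have hcle : c ≤ 0 := by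
      have : (c - 1) * m < 0 := by omega
      nlinarith
    rw [max_eq_left hcle, max_eq_left (by omega), zero_mul,
      if_neg (by omega)]
    omega

theorem pvMainEq (total num primary_idx primary_size : Int) (hn : 1 ≤ num) :
    split_sizes_py total num primary_idx primary_size
      = split_sizes_py_alt total num primary_idx primary_size := by
  unfold split_sizes_py split_sizes_py_alt
  by_cases h1 : num = 1
  · simp [h1]
  · simp only [beq_iff_eq, if_neg h1]
    have hn2 : 2 ≤ num := by omega
    set p := max 0 (min (num - 1) primary_idx) with hpdef
    set psz := max 0 (min total primary_size) with hpszdef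
    set R := total - psz with hRdef
    set base := max 0 (PySem.Int.floordiv R (num - 1)) with hbasedef
    set rem := R - base * (num - 1) with hremdef
    have hp0 : 0 ≤ p := by omega
    have hpn : p < num := by omega
    -- the initial sizes list of A
    have hs1 : PySem.List.pySetD (List.replicate num.toNat base) p psz
        = (List.replicate num.toNat base).set p.toNat psz :=
      PySem.List.pySetD_of_nonneg _ _ hp0
    set s1 := (List.replicate num.toNat base).set p.toNat psz with hs1def
    have hlen1 : s1.length = num.toNat := by simp [hs1def]
    have hs1get : ∀ k : Nat, k < num.toNat →
        s1.getD k 0 = if k = p.toNat then psz else base := by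
      intro k hk
      by_cases hkp : k = p.toNat
      · rw [if_pos hkp, hkp, List.getD_eq_getElem _ _ (by omega),
          List.getElem_set_self]
      · rw [if_neg hkp]
        unfold List.getD
        rw [List.getElem?_set_ne (by omega), List.getElem?_replicate_of_lt hk]
        rfl
    -- characterize A's fold
    obtain ⟨hAl, hApt⟩ := pvFoldA_char p rem num hp0 num.toNat 0 s1
      (le_refl 0) (by omega) (by omega) (by rw [hlen1]; omega)
    rw [if_pos hp0] at hAl hApt
    rw [hs1]
    -- B's list
    set f : Int → Int := fun i => if i = p then psz
        else max 0 (-(PySem.Int.floordiv (i - (if p < i then 1 else 0) - R) (num - 1))) with hfdef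
    have hBlen : ((PySem.List.pyRange 0 num 1).map f).length = num.toNat := by
      simp [PySem.List.length_pyRange_one]
    have hBget : ∀ k : Nat, (k : Int) < num →
        ((PySem.List.pyRange 0 num 1).map f).getD k 0 = f k := by
      intro k hk
      rw [← PySem.List.pyGetD_natCast,
        PySem.List.pyGetD_map_pyRange_of_nonneg _ _ _ _ (by omega) hk]
    apply List.ext_getElem (by rw [hAl, hlen1, hBlen])
    intro i hi1 hi2
    rw [← List.getD_eq_getElem _ 0 hi1, ← List.getD_eq_getElem _ 0 hi2]
    have hik : i < num.toNat := by rw [hAl, hlen1] at hi1; exact hi1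
    rw [hApt i (by omega), hBget i (by omega)]
    by_cases hip : (i : Int) = p
    · rw [if_pos (Or.inr hip), hs1get i hik, if_pos (by omega)]
      simp only [hfdef, if_pos hip]
    · rw [if_neg (show ¬((i:Int) < 0 ∨ (i:Int) = p) by omega), hs1get i hik,
        if_neg (by omega)]
      simp only [hfdef, if_neg hip]
      set k : Int := (i : Int) - (if p < (i : Int) then 1 else 0) with hkdef
      have hk' : (if (i : Int) ≤ p then (i : Int) else (i : Int) - 1) = k := by
        simp only [hkdef]; split_ifs <;> omega
      rw [hk']
      have hk0 : 0 ≤ k := by simp only [hkdef]; split_ifs <;> omega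
      have hkm : k < num - 1 := by simp only [hkdef]; split_ifs <;> omega
      rw [pvCeilEq R (num - 1) k (by omega) hk0 hkm]

-- ===== VERDICT (by name: the statement is the Claim_ definition above) =====
theorem split_sizes_py_spec : Claim_equal_split_sizes_py := by
  intro total num primary_idx primary_size _ hpre
  unfold Spec_split_sizes_py
  exact pvMainEq total num primary_idx primary_size hpre
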